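-- pv_equiv track=rewrite | github.com/pypi-data/pypi-mirror-385 | packages/py-allspice/py_allspice-3.12.0.tar.gz/py_allspice-3.12.0/allspice/utils/list_components.py | _combine_multi_part_components_for_altium
-- ===== SOURCE A (Python) =====
-- DESIGNATOR_COLUMN_NAME = "Designator"
--
-- LOGICAL_DESIGNATOR = "_logical_designator"
--
-- def _combine_multi_part_components_for_altium(
--     components: list[dict[str, str]],
-- ) -> list[dict[str, str]]:
--     """
--     Combine multi-part Altium components into a single component.
--
--     Altium multi-part components can be distinguished by the `_part_count` and
--     `_current_part_id` attributes being present, which respectively store the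
--     total number of parts and the current part number. If that is the case, the
--     `_logical_designator` attribute ties together the different parts of the
--     component.
--     """
--
--     combined_components = []
--     multi_part_components_by_designator = {}
--
--     for component in components:
--         if "_part_count" in component and "_current_part_id" in component:
--             designator = component[LOGICAL_DESIGNATOR]
--             multi_part_components_by_designator.setdefault(designator, []).append(component)
--         else:
--             combined_components.append(component)
--
--     for designator, multi_part_components in multi_part_components_by_designator.items():
--         combined_component = multi_part_components[0].copy()
--         combined_component[DESIGNATOR_COLUMN_NAME] = designator
--         # The combined component shouldn't have the current part id, as it is
--         # not any of the parts.
--         del combined_component["_current_part_id"]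
--         combined_components.append(combined_component)
--
--     return combined_components
-- ===== SOURCE B (Python) =====
-- DESIGNATOR_COLUMN_NAME = "Designator"
--
-- LOGICAL_DESIGNATOR = "_logical_designator"
--
--
-- def _is_multi_part(component):
--     return "_part_count" in component and "_current_part_id" in component
--
--
-- def _representative(parts, designator):
--     # The group's representative is built from the FIRST part carrying this
--     # logical designator.
--     first = next(p for p in parts if p[LOGICAL_DESIGNATOR] == designator)
--     rep = first.copy()
--     rep[DESIGNATOR_COLUMN_NAME] = designator
--     del rep["_current_part_id"]
--     return rep
--
--
-- def _combine_multi_part_components_for_altium(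
--     components: list[dict[str, str]],
-- ) -> list[dict[str, str]]:
--     # Staged pipeline instead of a grouping dict: split the list into
--     # non-multipart components and parts, list the distinct logical
--     # designators in first-occurrence order, and build each group's
--     # representative from the first part found with that designator.
--     singles = [c for c in components if not _is_multi_part(c)]
--     parts = [c for c in components if _is_multi_part(c)]
--     order = dict.fromkeys(p[LOGICAL_DESIGNATOR] for p in parts)
--     return singles + [_representative(parts, d) for d in order]
-- ===== Notes on version B (the rewrite author's own statement) =====
-- stated objective: simpler
-- what changed: Replaces A's stateful two-phase grouping (a dict from designator to the list of all its parts, then a loop over the dict items) by a staged pipeline: two filters split singles from parts, dict.fromkeys lists the distinct designators in first-occurrence order, and each representative is rebuilt by searching the parts list for the first part with that designator; no group lists are ever materialised.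
import Mathlib
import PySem

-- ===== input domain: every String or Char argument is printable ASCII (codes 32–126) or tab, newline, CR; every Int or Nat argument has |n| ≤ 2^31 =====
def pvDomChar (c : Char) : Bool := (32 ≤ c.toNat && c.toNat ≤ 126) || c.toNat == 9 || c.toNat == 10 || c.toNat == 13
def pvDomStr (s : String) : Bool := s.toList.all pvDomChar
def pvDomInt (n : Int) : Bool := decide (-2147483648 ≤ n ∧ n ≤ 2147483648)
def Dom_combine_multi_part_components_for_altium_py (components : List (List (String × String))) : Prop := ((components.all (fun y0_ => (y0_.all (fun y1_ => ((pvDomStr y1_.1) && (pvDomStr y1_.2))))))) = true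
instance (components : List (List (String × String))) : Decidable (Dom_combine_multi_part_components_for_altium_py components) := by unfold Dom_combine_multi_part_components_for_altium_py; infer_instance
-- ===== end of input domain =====

-- B replaces A's stateful dict-of-groups construction by a staged pipeline:
-- filter singles/parts, dedup the designators, rebuild each representative by
-- searching for the group's first part (objective: simpler).

-- ===== PORT A =====
-- A's first loop: classify each component, grouping multi-part ones by designator.
def pvStepA (st : List (List (String × String)) × PySem.Dict String (List (List (String × String))))
    (c : List (String × String)) :
    List (List (String × String)) × PySem.Dict String (List (List (String × String))) :=
  if (PySem.Dict.mk c).contains "_part_count" && (PySem.Dict.mk c).contains "_current_part_id" then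
    -- component[LOGICAL_DESIGNATOR]: Python raises KeyError when absent — excluded by Pre_
    let designator := (PySem.Dict.mk c).getD "_logical_designator" ""
    (st.1, st.2.modify designator [] (fun l => l ++ [c]))   -- setdefault(...,[]).append(c)
  else
    (st.1 ++ [c], st.2)

def combine_multi_part_components_for_altium_py (components : List (List (String × String))) : List (List (String × String)) :=
  let st := components.foldl pvStepA ([], PySem.Dict.empty)
  -- A's second loop over the dict's items, in insertion order
  st.1 ++ st.2.items.map (fun p =>
    ((((PySem.Dict.mk (p.2.headD [])).insert "Designator" p.1).erase "_current_part_id")).items)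

-- ===== PORT B =====
-- Source B's helper _is_multi_part
def pvIsMultiPart (c : List (String × String)) : Bool :=
  (PySem.Dict.mk c).contains "_part_count" && (PySem.Dict.mk c).contains "_current_part_id"

-- p[LOGICAL_DESIGNATOR] (Python raises KeyError when absent — excluded by Pre_)
def pvLogicalDesig (c : List (String × String)) : String :=
  (PySem.Dict.mk c).getD "_logical_designator" ""

-- Source B's helper _representative: next(p for p in parts if …) then copy/set/del
def pvRepresentative (parts : List (List (String × String))) (designator : String) :
    List (String × String) :=
  match parts.find? (fun p => pvLogicalDesig p == designator) with
  | some first => (((PySem.Dict.mk first).insert "Designator" designator).erase "_current_part_id").items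
  | none => []   -- unreachable: designator is drawn from parts

def combine_multi_part_components_for_altium_py_alt (components : List (List (String × String))) : List (List (String × String)) :=
  let singles := components.filter (fun c => !pvIsMultiPart c)
  let parts := components.filter pvIsMultiPart
  let order := PySem.List.dedup (parts.map pvLogicalDesig)   -- dict.fromkeys(...)
  singles ++ order.map (pvRepresentative parts)

-- ===== PRECONDITION & SPEC =====
-- Pre_ excludes exactly the inputs on which the Python raises KeyError: a component
-- carrying both "_part_count" and "_current_part_id" but no "_logical_designator"
-- (both A and B subscript component["_logical_designator"] there).
def Pre_combine_multi_part_components_for_altium_py (components : List (List (String × String))) : Prop :=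
  ∀ c ∈ components,
    ((PySem.Dict.mk c).contains "_part_count" && (PySem.Dict.mk c).contains "_current_part_id") = true →
    (PySem.Dict.mk c).contains "_logical_designator" = true

instance (components : List (List (String × String))) : Decidable (Pre_combine_multi_part_components_for_altium_py components) := by unfold Pre_combine_multi_part_components_for_altium_py; infer_instance

def pvWitness_combine_multi_part_components_for_altium_py : (List (List (String × String))) :=
  [[("Designator", "U1A"), ("_part_count", "2"), ("_current_part_id", "1"), ("_logical_designator", "U1")],
   [("Designator", "R5"), ("Value", "10k")],
   [("Designator", "U1B"), ("_part_count", "2"), ("_current_part_id", "2"), ("_logical_designator", "U1")]]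

def Spec_combine_multi_part_components_for_altium_py (components : List (List (String × String))) (out : List (List (String × String))) : Prop := out = combine_multi_part_components_for_altium_py_alt components
instance (components : List (List (String × String))) (out : List (List (String × String))) : Decidable (Spec_combine_multi_part_components_for_altium_py components out) := by unfold Spec_combine_multi_part_components_for_altium_py; infer_instance

-- ===== CLAIM (what is proved, stated in full; the proofs are below) =====
def Claim_equal_combine_multi_part_components_for_altium_py : Prop := ∀ (components : List (List (String × String))), Dom_combine_multi_part_components_for_altium_py components → Pre_combine_multi_part_components_for_altium_py components → Spec_combine_multi_part_components_for_altium_py components (combine_multi_part_components_for_altium_py components)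

-- ===== LEMMAS AND PROOFS =====

-- A's grouping dict, extracted: the fold only its dict component performs
def pvGroupStep (d : PySem.Dict String (List (List (String × String))))
    (c : List (String × String)) : PySem.Dict String (List (List (String × String))) :=
  d.modify (pvLogicalDesig c) [] (fun l => l ++ [c])

-- A's first loop = filter split + the dict fold over the parts only
theorem pvFoldA_split (cs : List (List (String × String)))
    (s1 : List (List (String × String))) (d : PySem.Dict String (List (List (String × String)))) :
    cs.foldl pvStepA (s1, d) =
      (s1 ++ cs.filter (fun c => !pvIsMultiPart c), (cs.filter pvIsMultiPart).foldl pvGroupStep d) := by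
  induction cs generalizing s1 d with
  | nil => simp
  | cons c cs ih =>
    by_cases h : pvIsMultiPart c = true
    · have hc : ((PySem.Dict.mk c).contains "_part_count" && (PySem.Dict.mk c).contains "_current_part_id") = true := h
      have hstep : pvStepA (s1, d) c = (s1, pvGroupStep d c) := if_pos hc
      simp [List.foldl_cons, hstep, ih, h]
    · have hb : pvIsMultiPart c = false := by revert h; cases pvIsMultiPart c <;> simp
      have hstep : pvStepA (s1, d) c = (s1 ++ [c], d) := if_neg h
      simp [List.foldl_cons, hstep, ih, hb]

-- the dict fold, rewritten over (key, value) pairs so that the PySem grouping lemmas apply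
theorem pvGroupFold_eq (ps : List (List (String × String))) :
    ps.foldl pvGroupStep PySem.Dict.empty =
      (ps.map (fun p => (pvLogicalDesig p, p))).foldl
        (fun d q => d.modify q.1 [] (fun l => l ++ [q.2])) PySem.Dict.empty := by
  rw [List.foldl_map]; rfl

theorem pvGroupDict_getD (ps : List (List (String × String))) (k : String) :
    (ps.foldl pvGroupStep PySem.Dict.empty).getD k [] =
      ps.filter (fun p => pvLogicalDesig p == k) := by
  rw [pvGroupFold_eq, PySem.Dict.getD_foldl_modify_append]
  simp [PySem.Dict.getD_empty, List.filter_map, Function.comp_def]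

theorem pvGroupDict_keys (ps : List (List (String × String))) :
    (ps.foldl pvGroupStep PySem.Dict.empty).keys = PySem.List.dedup (ps.map pvLogicalDesig) := by
  unfold pvGroupStep
  rw [PySem.Dict.keys_foldl_modify_key]
  simp [PySem.Dict.keys_empty, PySem.Set.update_nil_left]

-- first element of a filter = first match
theorem pvHead_filter {α : Type} (q : α → Bool) (l : List α) :
    (l.filter q).head? = l.find? q := by
  induction l with
  | nil => rfl
  | cons x xs ih =>
    by_cases h : q x = true
    · simp [List.find?, h]
    · have hb : q x = false := by revert h; cases q x <;> simp
      simp [List.find?, hb, ih]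

-- ===== VERDICT (by name: the statement is the Claim_ definition above) =====
theorem combine_multi_part_components_for_altium_py_spec : Claim_equal_combine_multi_part_components_for_altium_py := by
  intro components _ _
  unfold Spec_combine_multi_part_components_for_altium_py
  simp only [combine_multi_part_components_for_altium_py, combine_multi_part_components_for_altium_py_alt]
  rw [pvFoldA_split]
  congr 1
  have hnd : ((components.filter pvIsMultiPart).foldl pvGroupStep PySem.Dict.empty).keys.Nodup := by
    rw [pvGroupDict_keys]; exact PySem.List.nodup_dedup _
  rw [PySem.Dict.items_eq_map_keys _ hnd [], List.map_map, pvGroupDict_keys]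
  apply List.map_congr_left
  intro k hk
  have hkmem : k ∈ (components.filter pvIsMultiPart).map pvLogicalDesig := (PySem.List.mem_dedup _ _).mp hk
  obtain ⟨p0, hp0, hp0k⟩ := List.mem_map.mp hkmem
  have hfind : (components.filter pvIsMultiPart).find? (fun p => pvLogicalDesig p == k) ≠ none := by
    intro hnone
    have := List.find?_eq_none.mp hnone p0 hp0
    simp [hp0k] at this
  obtain ⟨pf, hpf⟩ := Option.ne_none_iff_exists'.mp hfind
  have hheadD : ((components.filter pvIsMultiPart).filter (fun p => pvLogicalDesig p == k)).headD [] = pf := by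
    rw [List.headD_eq_head?_getD, pvHead_filter, hpf]; rfl
  simp only [Function.comp_def, pvRepresentative, hpf, pvGroupDict_getD, hheadD]
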